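-- pv_equiv track=rewrite | github.com/samuelbraun04/Instrumentator | BeatGenerator.py | adjust_pitch_to_range
-- ===== SOURCE A (Python) =====
-- def adjust_pitch_to_range(data):
--     for event in data:
--         # Check if event is a Note_on_c or Note_off_c event
--         if event[2] in ['Note_on_c', 'Note_off_c']:
--             pitch = int(event[4])
--             # Adjust the pitch until it's within the desired range
--             while pitch < 0:
--                 pitch += 12
--             while pitch > 12:
--                 pitch -= 12
--             # Update the event with the adjusted pitch
--             event[4] = str(pitch)
--             event[5] = '100'
--     return data
-- ===== SOURCE B (Python) =====
-- def _fix(event):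
--     # pure per-event transform: closed-form modulo reduction + slice reconstruction
--     if len(event) > 2 and event[2] in ('Note_on_c', 'Note_off_c'):
--         p = int(event[4])
--         p = p % 12 if p < 0 else (p - 1) % 12 + 1 if p > 12 else p
--         return event[:4] + [str(p), '100'] + event[6:]
--     return event
--
-- def adjust_pitch_to_range(data):
--     # Unlike A (which mutates each event in place), B builds a fresh list of fresh
--     # events; equivalence is claimed on the RETURN value.
--     return [_fix(e) for e in data]
-- ===== Notes on version B (the rewrite author's own statement) =====
-- stated objective: alternative
-- what changed: the in-place two-while-loop pitch adjustment is replaced by a pure per-event function that reduces the pitch with a closed-form modulo and rebuilds the event by slice concatenation, mapped over the data (no mutation)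
import Mathlib
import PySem

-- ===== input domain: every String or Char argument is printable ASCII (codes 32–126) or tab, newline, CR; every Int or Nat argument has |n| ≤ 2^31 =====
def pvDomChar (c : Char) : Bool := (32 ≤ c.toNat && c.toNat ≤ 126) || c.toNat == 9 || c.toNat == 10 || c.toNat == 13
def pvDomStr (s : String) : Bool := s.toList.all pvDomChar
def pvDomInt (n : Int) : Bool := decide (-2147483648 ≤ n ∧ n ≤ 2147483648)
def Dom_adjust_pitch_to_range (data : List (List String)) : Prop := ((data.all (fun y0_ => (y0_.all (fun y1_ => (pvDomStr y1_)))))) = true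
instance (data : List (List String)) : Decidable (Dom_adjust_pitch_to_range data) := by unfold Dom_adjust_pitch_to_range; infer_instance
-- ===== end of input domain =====

-- B replaces A's in-place two-while-loop adjustment by a pure per-event function (closed-form
-- modulo, slice reconstruction) mapped over the data; A mutates `data` in place while B builds a
-- fresh list — the equivalence proved here is about the RETURN value.

-- ===== PORT A =====
-- while pitch < 0: pitch += 12
def pvWhileNeg (p : Int) : Int :=
  if p < 0 then pvWhileNeg (p + 12) else p
termination_by (-p).toNat
decreasing_by omega

-- while pitch > 12: pitch -= 12
def pvWhileHigh (p : Int) : Int :=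
  if p > 12 then pvWhileHigh (p - 12) else p
termination_by p.toNat
decreasing_by omega

-- body of A's for-loop for one event (inside Pre_ the index lookups and int() always succeed)
def pvStepA (event : List String) : List String :=
  match PySem.List.pyGet? event 2 with
  | none => event
  | some t =>
    if t = "Note_on_c" ∨ t = "Note_off_c" then
      match (PySem.List.pyGet? event 4).bind PySem.Int.ofStr? with
      | none => event
      | some p0 =>
        let pitch := pvWhileHigh (pvWhileNeg p0)
        ((event.set 4 (PySem.Int.toStr pitch)).set 5 "100")
    else event

def adjust_pitch_to_range (data : List (List String)) : List (List String) :=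
  data.map pvStepA

-- ===== PORT B =====
-- pure per-event transform of Source B's _fix: length guard, closed-form modulo, slice concatenation
def pvFixB (event : List String) : List String :=
  if 2 < event.length && (event.getD 2 "" == "Note_on_c" || event.getD 2 "" == "Note_off_c") then
    match (PySem.List.pyGet? event 4).bind PySem.Int.ofStr? with
    | some p0 =>
      let p := if p0 < 0 then PySem.Int.mod p0 12
               else if p0 > 12 then PySem.Int.mod (p0 - 1) 12 + 1
               else p0
      PySem.List.slice event none (some 4) ++ [PySem.Int.toStr p, "100"] ++ PySem.List.slice event (some 6) none
    | none => event
  else event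

def adjust_pitch_to_range_alt : List (List String) → List (List String)
  | [] => []
  | e :: rest => pvFixB e :: adjust_pitch_to_range_alt rest

-- ===== PRECONDITION & SPEC =====
-- Pre_: exactly where the Python A returns normally — every event has index 2, and a
-- Note_on_c/Note_off_c event has at least 6 fields with an int()-parsable field 4.
def Pre_adjust_pitch_to_range (data : List (List String)) : Prop :=
  ∀ event ∈ data, 3 ≤ event.length ∧
    ((PySem.List.pyGet? event 2 = some "Note_on_c" ∨ PySem.List.pyGet? event 2 = some "Note_off_c") →
      6 ≤ event.length ∧ ((PySem.List.pyGet? event 4).bind PySem.Int.ofStr?).isSome)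
instance (data : List (List String)) : Decidable (Pre_adjust_pitch_to_range data) := by
  unfold Pre_adjust_pitch_to_range; infer_instance

def pvWitness_adjust_pitch_to_range : List (List String) :=
  [["0", "0", "Note_on_c", "1", "-15", "64"], ["0", "0", "Header", "x"]]

def Spec_adjust_pitch_to_range (data : List (List String)) (out : List (List String)) : Prop := out = adjust_pitch_to_range_alt data
instance (data : List (List String)) (out : List (List String)) : Decidable (Spec_adjust_pitch_to_range data out) := by unfold Spec_adjust_pitch_to_range; infer_instance

-- ===== CLAIM =====
def Claim_equal_adjust_pitch_to_range : Prop := ∀ (data : List (List String)), Dom_adjust_pitch_to_range data → Pre_adjust_pitch_to_range data → Spec_adjust_pitch_to_range data (adjust_pitch_to_range data)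

-- ===== LEMMAS AND PROOFS =====

theorem pvWhileNeg_eq (p : Int) : pvWhileNeg p = if p < 0 then PySem.Int.mod p 12 else p := by
  rw [pvWhileNeg]
  by_cases h : p < 0
  · rw [if_pos h, if_pos h, pvWhileNeg_eq (p + 12)]
    simp only [PySem.Int.mod_eq_emod_of_pos (by norm_num : (0:Int) < 12)]
    by_cases h2 : p + 12 < 0
    · rw [if_pos h2]; omega
    · rw [if_neg h2]; omega
  · rw [if_neg h, if_neg h]
termination_by (-p).toNat
decreasing_by omega

theorem pvWhileHigh_eq (p : Int) : pvWhileHigh p = if p > 12 then PySem.Int.mod (p - 1) 12 + 1 else p := by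
  rw [pvWhileHigh]
  by_cases h : p > 12
  · rw [if_pos h, if_pos h, pvWhileHigh_eq (p - 12)]
    simp only [PySem.Int.mod_eq_emod_of_pos (by norm_num : (0:Int) < 12)]
    by_cases h2 : p - 12 > 12
    · rw [if_pos h2]; omega
    · rw [if_neg h2]; omega
  · rw [if_neg h, if_neg h]
termination_by p.toNat
decreasing_by omega

-- A's two while loops compute B's closed form (B tests p<0 first; the branches are exclusive)
theorem pvReduce_eq (p : Int) :
    pvWhileHigh (pvWhileNeg p) =
      if p < 0 then PySem.Int.mod p 12
      else if p > 12 then PySem.Int.mod (p - 1) 12 + 1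
      else p := by
  rw [pvWhileNeg_eq, pvWhileHigh_eq]
  have h1 : 0 ≤ PySem.Int.mod p 12 := PySem.Int.mod_nonneg p (by norm_num)
  have h2 : PySem.Int.mod p 12 < 12 := PySem.Int.mod_lt p (by norm_num)
  split_ifs <;> first | rfl | omega

-- A's double in-place set equals B's slice reconstruction on events of length ≥ 6
theorem set_set_eq_slices (event : List String) (h : 6 ≤ event.length) (x y : String) :
    (event.set 4 x).set 5 y =
      PySem.List.slice event none (some 4) ++ [x, y] ++ PySem.List.slice event (some 6) none := by
  match event, h with
  | a :: b :: c :: d :: e :: f :: r, _ =>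
    simp [PySem.List.slice, PySem.List.clampIdx]

theorem pvStep_eq (event : List String)
    (hlen : 3 ≤ event.length)
    (hnote : (PySem.List.pyGet? event 2 = some "Note_on_c" ∨ PySem.List.pyGet? event 2 = some "Note_off_c") →
      6 ≤ event.length ∧ ((PySem.List.pyGet? event 4).bind PySem.Int.ofStr?).isSome) :
    pvStepA event = pvFixB event := by
  have hget : PySem.List.pyGet? event 2 = some (event.getD 2 "") := by
    rw [show ((2:Int)) = ((2:Nat):Int) from rfl, PySem.List.pyGet?_natCast]
    rw [List.getElem?_eq_getElem (by omega), List.getD_eq_getElem _ _ (by omega)]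
  by_cases hm : event.getD 2 "" = "Note_on_c" ∨ event.getD 2 "" = "Note_off_c"
  · have h6 := hnote (by rw [hget]; rcases hm with h | h <;> [left; right] <;> rw [h])
    obtain ⟨hl6, hps⟩ := h6
    have hguard : (2 < event.length && (event.getD 2 "" == "Note_on_c" || event.getD 2 "" == "Note_off_c")) = true := by
      simp only [Bool.and_eq_true, Bool.or_eq_true, beq_iff_eq, decide_eq_true_eq]
      exact ⟨by omega, hm⟩
    obtain ⟨p0, hp0⟩ := Option.isSome_iff_exists.mp hps
    simp only [pvStepA, pvFixB, hget, hguard, if_pos hm, hp0, if_true, pvReduce_eq]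
    exact set_set_eq_slices event hl6 _ _
  · have hguard : (2 < event.length && (event.getD 2 "" == "Note_on_c" || event.getD 2 "" == "Note_off_c")) = false := by
      simp only [Bool.and_eq_false_iff, Bool.or_eq_false_iff, beq_eq_false_iff_ne, ne_eq]
      right; exact ⟨fun h => hm (Or.inl h), fun h => hm (Or.inr h)⟩
    simp only [pvStepA, pvFixB, hget, hguard, if_neg hm, Bool.false_eq_true, if_false]

theorem alt_eq_map (l : List (List String)) : adjust_pitch_to_range_alt l = l.map pvFixB := by
  induction l with
  | nil => rfl
  | cons e r ih => simp [adjust_pitch_to_range_alt, ih]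

-- ===== VERDICT =====
theorem adjust_pitch_to_range_spec : Claim_equal_adjust_pitch_to_range := by
  intro data _ hpre
  unfold Spec_adjust_pitch_to_range adjust_pitch_to_range
  rw [alt_eq_map]
  exact List.map_congr_left (fun e he => pvStep_eq e (hpre e he).1 (hpre e he).2)
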